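-- pv_equiv track=rewrite | github.com/Keshtel/phd-thesis-code | Plotting/Functions/UnifyWormsFun.py | get_nonzero_start_end
-- ===== SOURCE A (Python) =====
-- def get_nonzero_start_end(turn_timepoints):
--     start_indices = []
--     end_indices = []
--     if not turn_timepoints[0]==0:
--         start_indices.append(0)
--     for i in range(len(turn_timepoints) - 1):
--         if turn_timepoints[i] == 0 and not(turn_timepoints[i+1] == 0):
--             start_indices.append(i+1)
--         if not(turn_timepoints[i] == 0) and (turn_timepoints[i+1] == 0):
--             end_indices.append(i)
--     if not turn_timepoints[-1]==0:
--         end_indices.append(len(turn_timepoints)-1)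
--     assert len(end_indices)==len(start_indices)
--     return start_indices,end_indices
-- ===== SOURCE B (Python) =====
-- def get_nonzero_start_end(turn_timepoints):
--     # Scan maximal nonzero runs directly: for each run record its first and last index.
--     start_indices = []
--     end_indices = []
--     n = len(turn_timepoints)
--     i = 0
--     while i < n:
--         if turn_timepoints[i] == 0:
--             i += 1
--         else:
--             j = i
--             while j + 1 < n and not turn_timepoints[j + 1] == 0:
--                 j += 1
--             start_indices.append(i)
--             end_indices.append(j)
--             i = j + 1
--     return start_indices, end_indices
-- ===== Notes on version B (the rewrite author's own statement) =====
-- stated objective: alternative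
-- what changed: Replaces A's per-position edge detection (compare each adjacent pair plus special-cased first/last elements) with a two-level scan over maximal nonzero runs, emitting each run's first and last index together.
import Mathlib
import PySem

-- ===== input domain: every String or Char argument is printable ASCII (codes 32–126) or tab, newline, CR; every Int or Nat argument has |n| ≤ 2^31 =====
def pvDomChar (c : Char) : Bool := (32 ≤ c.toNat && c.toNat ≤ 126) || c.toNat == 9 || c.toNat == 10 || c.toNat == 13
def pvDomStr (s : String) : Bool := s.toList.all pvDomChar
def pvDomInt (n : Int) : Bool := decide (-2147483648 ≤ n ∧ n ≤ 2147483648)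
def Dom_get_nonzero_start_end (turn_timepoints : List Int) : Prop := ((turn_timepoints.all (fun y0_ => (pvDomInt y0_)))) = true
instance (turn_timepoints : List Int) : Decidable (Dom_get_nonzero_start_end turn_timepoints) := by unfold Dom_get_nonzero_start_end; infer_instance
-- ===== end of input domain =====

-- B replaces A's per-position edge detection with a scan over maximal nonzero runs (objective: alternative).

-- ===== PORT A =====
-- xs[0], xs[i], xs[i+1], xs[-1] are ported as pyGetD with default 0: under Pre_ (nonempty list)
-- every access is in range, so this is exact. A's final assert always holds and is not a computation.
def get_nonzero_start_end (turn_timepoints : List Int) : List Int × List Int :=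
  let n : Int := (turn_timepoints.length : Int)
  let start_indices : List Int :=
    if ¬ PySem.List.pyGetD turn_timepoints 0 0 = 0 then [0] else []
  let end_indices : List Int := []
  let p :=
    (PySem.List.pyRange 0 (n - 1) 1).foldl
      (fun (acc : List Int × List Int) i =>
        let acc :=
          if PySem.List.pyGetD turn_timepoints i 0 = 0 ∧
              ¬ PySem.List.pyGetD turn_timepoints (i + 1) 0 = 0 then
            (acc.1 ++ [i + 1], acc.2)
          else acc
        if ¬ PySem.List.pyGetD turn_timepoints i 0 = 0 ∧
            PySem.List.pyGetD turn_timepoints (i + 1) 0 = 0 then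
          (acc.1, acc.2 ++ [i])
        else acc)
      (start_indices, end_indices)
  let end_indices :=
    if ¬ PySem.List.pyGetD turn_timepoints (-1) 0 = 0 then p.2 ++ [n - 1] else p.2
  (p.1, end_indices)

-- ===== PORT B =====
-- while loops are ported with a Nat fuel bounded below by the remaining iterations (len suffices)
-- inner while loop: advance j while the next element is in range and nonzero
def pvAltInner (tp : List Int) (n : Int) : Nat → Int → Int
  | 0, j => j
  | fuel + 1, j =>
    if j + 1 < n ∧ ¬ PySem.List.pyGetD tp (j + 1) 0 = 0 then pvAltInner tp n fuel (j + 1)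
    else j

-- outer while loop over i
def pvAltOuter (tp : List Int) (n : Int) : Nat → Int → List Int → List Int → List Int × List Int
  | 0, _, s, e => (s, e)
  | fuel + 1, i, s, e =>
    if i < n then
      if PySem.List.pyGetD tp i 0 = 0 then pvAltOuter tp n fuel (i + 1) s e
      else
        let j := pvAltInner tp n fuel i
        pvAltOuter tp n fuel (j + 1) (s ++ [i]) (e ++ [j])
    else (s, e)

def get_nonzero_start_end_alt (turn_timepoints : List Int) : List Int × List Int :=
  pvAltOuter turn_timepoints (turn_timepoints.length : Int) turn_timepoints.length 0 [] []

-- ===== PRECONDITION & SPEC =====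
-- Pre_ excludes exactly the empty list, on which A raises IndexError reading the first element.
def Pre_get_nonzero_start_end (turn_timepoints : List Int) : Prop := turn_timepoints ≠ []
instance (turn_timepoints : List Int) : Decidable (Pre_get_nonzero_start_end turn_timepoints) := by
  unfold Pre_get_nonzero_start_end; infer_instance

def pvWitness_get_nonzero_start_end : List Int := [0, 3, 4, 0, 5]

def Spec_get_nonzero_start_end (turn_timepoints : List Int) (out : List Int × List Int) : Prop :=
  out = get_nonzero_start_end_alt turn_timepoints
instance (turn_timepoints : List Int) (out : List Int × List Int) :
    Decidable (Spec_get_nonzero_start_end turn_timepoints out) := by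
  unfold Spec_get_nonzero_start_end; infer_instance

-- ===== CLAIM (what is proved, stated in full; the proofs are below) =====
def Claim_equal_get_nonzero_start_end : Prop :=
  ∀ (turn_timepoints : List Int), Dom_get_nonzero_start_end turn_timepoints →
    Pre_get_nonzero_start_end turn_timepoints →
    Spec_get_nonzero_start_end turn_timepoints (get_nonzero_start_end turn_timepoints)

-- ===== LEMMAS AND PROOFS =====

-- the common closed form: indices that start (resp. end) a maximal nonzero run, from position i on
def pvRunsS (tp : List Int) (n i : Int) : List Int :=
  (PySem.List.pyRange i n 1).filter
    (fun j => decide (¬ PySem.List.pyGetD tp j 0 = 0 ∧ (j = 0 ∨ PySem.List.pyGetD tp (j - 1) 0 = 0)))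

def pvRunsE (tp : List Int) (n i : Int) : List Int :=
  (PySem.List.pyRange i n 1).filter
    (fun j => decide (¬ PySem.List.pyGetD tp j 0 = 0 ∧ (j = n - 1 ∨ PySem.List.pyGetD tp (j + 1) 0 = 0)))

theorem pvAltInner_spec (tp : List Int) (n : Int) (fuel : Nat) (i : Int)
    (hi : i < n) (hfuel : n - 1 - i ≤ (fuel : Int)) :
    i ≤ pvAltInner tp n fuel i ∧ pvAltInner tp n fuel i < n ∧
    (∀ k, i < k → k ≤ pvAltInner tp n fuel i → ¬ PySem.List.pyGetD tp k 0 = 0) ∧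
    (n ≤ pvAltInner tp n fuel i + 1 ∨ PySem.List.pyGetD tp (pvAltInner tp n fuel i + 1) 0 = 0) := by
  induction fuel generalizing i with
  | zero =>
    simp only [pvAltInner]
    exact ⟨le_refl i, hi, fun k hk1 hk2 => absurd hk2 (by omega), Or.inl (by omega)⟩
  | succ fuel ih =>
    simp only [pvAltInner]
    split
    · rename_i h
      have ihr := ih (i + 1) h.1 (by push_cast at hfuel ⊢; omega)
      refine ⟨by omega, ihr.2.1, ?_, ihr.2.2.2⟩
      intro k hk1 hk2
      rcases lt_or_ge (i + 1) k with h' | h'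
      · exact ihr.2.2.1 k h' hk2
      · have : k = i + 1 := by omega
        subst this; exact h.2
    · rename_i h
      push_neg at h
      refine ⟨le_refl i, hi, ?_, ?_⟩
      · intro k hk1 hk2; omega
      · by_cases hc : i + 1 < n
        · exact Or.inr (h hc)
        · exact Or.inl (by omega)

theorem pvAltOuter_eq (tp : List Int) (n : Int) (fuel : Nat) (i : Int) (s e : List Int)
    (hn : n = (tp.length : Int)) (h0 : 0 ≤ i) (hfuel : n - i ≤ (fuel : Int))
    (hinv : i = 0 ∨ PySem.List.pyGetD tp (i - 1) 0 = 0 ∨ PySem.List.pyGetD tp i 0 = 0 ∨ n ≤ i) :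
    pvAltOuter tp n fuel i s e = (s ++ pvRunsS tp n i, e ++ pvRunsE tp n i) := by
  induction fuel generalizing i s e with
  | zero =>
    simp only [pvAltOuter]
    unfold pvRunsS pvRunsE
    rw [PySem.List.pyRange_one_eq_nil (by push_cast at hfuel; omega)]
    simp
  | succ fuel ih =>
    simp only [pvAltOuter]
    split
    · rename_i hlt
      split
      · rename_i hz
        rw [ih (i + 1) s e (by omega) (by push_cast at hfuel ⊢; omega)
          (Or.inr (Or.inl (by simpa using hz)))]
        have hS : pvRunsS tp n i = pvRunsS tp n (i + 1) := by
          unfold pvRunsS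
          rw [PySem.List.pyRange_one_cons hlt, List.filter_cons]
          simp [hz]
        have hE : pvRunsE tp n i = pvRunsE tp n (i + 1) := by
          unfold pvRunsE
          rw [PySem.List.pyRange_one_cons hlt, List.filter_cons]
          simp [hz]
        rw [hS, hE]
      · rename_i hz
        obtain ⟨hij, hjn, hrun, hend⟩ :=
          pvAltInner_spec tp n fuel i hlt (by push_cast at hfuel ⊢; omega)
        have hfront : i = 0 ∨ PySem.List.pyGetD tp (i - 1) 0 = 0 := by
          rcases hinv with h | h | h | h
          · exact Or.inl h
          · exact Or.inr h
          · exact absurd h hz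
          · omega
        rw [ih (pvAltInner tp n fuel i + 1) _ _ (by omega) (by push_cast at hfuel ⊢; omega)
          (by rcases hend with h | h
              · exact Or.inr (Or.inr (Or.inr (by omega)))
              · exact Or.inr (Or.inr (Or.inl h)))]
        have hS : pvRunsS tp n i = i :: pvRunsS tp n (pvAltInner tp n fuel i + 1) := by
          unfold pvRunsS
          rw [PySem.List.pyRange_one_append i (pvAltInner tp n fuel i + 1) n (by omega) (by omega),
            List.filter_append, PySem.List.pyRange_one_cons (by omega : i < pvAltInner tp n fuel i + 1),
            List.filter_cons]
          have hc : (decide (¬ PySem.List.pyGetD tp i 0 = 0 ∧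
              (i = 0 ∨ PySem.List.pyGetD tp (i - 1) 0 = 0))) = true := by
            simp only [decide_eq_true_eq]; exact ⟨hz, hfront⟩
          rw [hc]
          have hnil : ((PySem.List.pyRange (i + 1) (pvAltInner tp n fuel i + 1) 1).filter
              (fun j => decide (¬ PySem.List.pyGetD tp j 0 = 0 ∧
                (j = 0 ∨ PySem.List.pyGetD tp (j - 1) 0 = 0)))) = [] := by
            apply List.filter_eq_nil_iff.mpr
            intro k hk
            have hk' := PySem.List.mem_pyRange_one.mp hk
            simp only [decide_eq_true_eq, not_and, not_or]
            intro _
            constructor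
            · omega
            · rcases eq_or_lt_of_le (show i ≤ k - 1 by omega) with h' | h'
              · rw [← h']; exact hz
              · exact hrun (k - 1) h' (by omega)
          rw [hnil]
          simp
        have hE : pvRunsE tp n i = pvAltInner tp n fuel i :: pvRunsE tp n (pvAltInner tp n fuel i + 1) := by
          unfold pvRunsE
          rw [PySem.List.pyRange_one_append i (pvAltInner tp n fuel i) n (by omega) (by omega),
            List.filter_append, PySem.List.pyRange_one_cons (by omega : pvAltInner tp n fuel i < n),
            List.filter_cons]
          have hc : (decide (¬ PySem.List.pyGetD tp (pvAltInner tp n fuel i) 0 = 0 ∧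
              (pvAltInner tp n fuel i = n - 1 ∨ PySem.List.pyGetD tp (pvAltInner tp n fuel i + 1) 0 = 0))) = true := by
            simp only [decide_eq_true_eq]
            refine ⟨?_, ?_⟩
            · rcases eq_or_lt_of_le hij with h' | h'
              · rw [← h']; exact hz
              · exact hrun _ h' (le_refl _)
            · rcases hend with h | h
              · exact Or.inl (by omega)
              · exact Or.inr h
          rw [hc]
          have hnil : ((PySem.List.pyRange i (pvAltInner tp n fuel i) 1).filter
              (fun j => decide (¬ PySem.List.pyGetD tp j 0 = 0 ∧
                (j = n - 1 ∨ PySem.List.pyGetD tp (j + 1) 0 = 0)))) = [] := by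
            apply List.filter_eq_nil_iff.mpr
            intro k hk
            have hk' := PySem.List.mem_pyRange_one.mp hk
            simp only [decide_eq_true_eq, not_and, not_or]
            intro _
            constructor
            · omega
            · exact hrun (k + 1) (by omega) (by omega)
          rw [hnil]
          simp
        rw [hS, hE]
        simp
    · rename_i hge
      unfold pvRunsS pvRunsE
      rw [PySem.List.pyRange_one_eq_nil (by omega)]
      simp

-- splits A's pair-valued loop into its two independent components (stated in the zeta-reduced shape)
theorem pvPairFold (c1 c2 : Int → Prop) [DecidablePred c1] [DecidablePred c2]
    (f g : Int → Int) (l : List Int) (s e : List Int) :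
    l.foldl (fun (acc : List Int × List Int) i =>
      if c2 i then ((if c1 i then (acc.1 ++ [f i], acc.2) else acc).1,
                    (if c1 i then (acc.1 ++ [f i], acc.2) else acc).2 ++ [g i])
      else (if c1 i then (acc.1 ++ [f i], acc.2) else acc)) (s, e)
    = (s ++ (l.filter (fun i => decide (c1 i))).map f,
       e ++ (l.filter (fun i => decide (c2 i))).map g) := by
  induction l generalizing s e with
  | nil => simp
  | cons x xs ih =>
    simp only [List.foldl_cons, List.filter_cons]
    by_cases h1 : c1 x <;> by_cases h2 : c2 x <;> simp [h1, h2, ih]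

theorem portA_eq (tp : List Int) (h : tp ≠ []) :
    get_nonzero_start_end tp = (pvRunsS tp (tp.length : Int) 0, pvRunsE tp (tp.length : Int) 0) := by
  have hlen : 0 < tp.length := List.length_pos_iff.mpr h
  have hn1 : (1 : Int) ≤ (tp.length : Int) := by exact_mod_cast hlen
  have hS : pvRunsS tp (tp.length : Int) 0
      = (if ¬ PySem.List.pyGetD tp 0 0 = 0 then [0] else [])
        ++ ((PySem.List.pyRange 0 ((tp.length : Int) - 1) 1).filter
            (fun i => decide (PySem.List.pyGetD tp i 0 = 0 ∧
              ¬ PySem.List.pyGetD tp (i + 1) 0 = 0))).map (fun i => i + 1) := by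
    unfold pvRunsS
    rw [PySem.List.pyRange_one_cons (by omega : (0:Int) < (tp.length : Int)), List.filter_cons]
    have e1 : PySem.List.pyRange (0 + 1) (tp.length : Int) 1
        = ((List.range ((tp.length : Int) - 1).toNat).map (fun k : Nat => (1 : Int) + k)) := by
      rw [PySem.List.pyRange_one]
      norm_num
    have e2 : PySem.List.pyRange 0 ((tp.length : Int) - 1) 1
        = ((List.range ((tp.length : Int) - 1).toNat).map (fun k : Nat => (0 : Int) + k)) := by
      rw [PySem.List.pyRange_one]
      norm_num
    rw [e1, e2, List.filter_map, List.filter_map, List.map_map]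
    have e3 : ((fun j => decide (¬ PySem.List.pyGetD tp j 0 = 0 ∧
          (j = 0 ∨ PySem.List.pyGetD tp (j - 1) 0 = 0))) ∘ (fun k : Nat => (1:Int) + k))
        = ((fun i => decide (PySem.List.pyGetD tp i 0 = 0 ∧
          ¬ PySem.List.pyGetD tp (i + 1) 0 = 0)) ∘ (fun k : Nat => (0:Int) + k)) := by
      funext k
      simp only [Function.comp_apply, decide_eq_decide]
      have h0 : (1 : Int) + (k : Int) ≠ 0 := by omega
      have h1 : (1 : Int) + (k : Int) - 1 = (0 : Int) + (k : Int) := by ring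
      have h2 : (0 : Int) + (k : Int) + 1 = (1 : Int) + (k : Int) := by ring
      rw [h1, h2]
      constructor
      · rintro ⟨a, b | b⟩
        · exact absurd b h0
        · exact ⟨b, a⟩
      · rintro ⟨a, b⟩
        exact ⟨b, Or.inr a⟩
    have e4 : ((fun i : Int => i + 1) ∘ (fun k : Nat => (0:Int) + k)) = (fun k : Nat => (1:Int) + k) := by
      funext k
      simp only [Function.comp_apply]
      ring
    rw [e3, e4]
    by_cases h0 : PySem.List.pyGetD tp 0 0 = 0 <;> simp [h0]
  have hneg : PySem.List.pyGetD tp (-1) 0 = PySem.List.pyGetD tp ((tp.length : Int) - 1) 0 := by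
    rw [show (-1 : Int) = -((1 : Nat) : Int) from by norm_num
      , PySem.List.pyGetD_neg_natCast tp 1 0 (by norm_num) hlen
      , PySem.List.pyGetD_eq_getElem tp (i := (tp.length : Int) - 1) 0 (by omega) (by omega)]
    congr 1
    omega
  have hE : pvRunsE tp (tp.length : Int) 0
      = ((PySem.List.pyRange 0 ((tp.length : Int) - 1) 1).filter
            (fun i => decide (¬ PySem.List.pyGetD tp i 0 = 0 ∧ PySem.List.pyGetD tp (i + 1) 0 = 0)))
        ++ (if ¬ PySem.List.pyGetD tp (-1) 0 = 0 then [(tp.length : Int) - 1] else []) := by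
    unfold pvRunsE
    have hsplit : PySem.List.pyRange 0 (tp.length : Int) 1
        = PySem.List.pyRange 0 ((tp.length : Int) - 1) 1 ++ [(tp.length : Int) - 1] := by
      have hs := PySem.List.pyRange_one_succ_right (a := 0) (b := (tp.length : Int) - 1) (by omega)
      rw [show (tp.length : Int) - 1 + 1 = (tp.length : Int) from by ring] at hs
      exact hs
    rw [hsplit, List.filter_append]
    congr 1
    · apply List.filter_congr
      intro j hj
      have hj' := PySem.List.mem_pyRange_one.mp hj
      simp only [decide_eq_decide]
      constructor
      · rintro ⟨a, b | b⟩
        · omega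
        · exact ⟨a, b⟩
      · rintro ⟨a, b⟩
        exact ⟨a, Or.inr b⟩
    · rw [List.filter_singleton, hneg]
      by_cases hl : PySem.List.pyGetD tp ((tp.length : Int) - 1) 0 = 0 <;> simp [hl]
  simp only [get_nonzero_start_end]
  rw [pvPairFold (fun i => PySem.List.pyGetD tp i 0 = 0 ∧ ¬ PySem.List.pyGetD tp (i + 1) 0 = 0)
      (fun i => ¬ PySem.List.pyGetD tp i 0 = 0 ∧ PySem.List.pyGetD tp (i + 1) 0 = 0)
      (fun i => i + 1) (fun i => i)]
  rw [hS, hE, hneg]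
  by_cases hl : PySem.List.pyGetD tp ((tp.length : Int) - 1) 0 = 0 <;> simp [hl]

-- ===== VERDICT (by name: the statement is the Claim_ definition above) =====
theorem get_nonzero_start_end_spec : Claim_equal_get_nonzero_start_end := by
  intro tp _ hpre
  unfold Spec_get_nonzero_start_end get_nonzero_start_end_alt
  rw [portA_eq tp hpre,
    pvAltOuter_eq tp _ tp.length 0 [] [] rfl (by omega) (by omega) (Or.inl rfl)]
  simp
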